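-- pv_equiv track=rewrite | github.com/ypisetsky/advent-of-code-2021 | lastyear/questions.py | dosurvey
-- ===== SOURCE A (Python) =====
-- from collections import defaultdict
--
-- def dosurvey(responses):
--     x = defaultdict(int)
--     responsecount = len(responses.split())
--     for c in responses:
--         if c >= 'a' and c <= 'z':
--             x[c] += 1
--     ret = 0
--     for count in x.values():
--         if count == responsecount:
--             ret += 1
--     return ret
-- ===== SOURCE B (Python) =====
-- def dosurvey(responses):
--     responsecount = len(responses.split())
--     letters = sorted(c for c in responses if 'a' <= c <= 'z')
--
--     def scan(rest):
--         if not rest: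
--             return 0
--         head = rest[0]
--         k = 1
--         while k < len(rest) and rest[k] == head:
--             k += 1
--         return (1 if k == responsecount else 0) + scan(rest[k:])
--
--     return scan(letters)
-- ===== Notes on version B (the rewrite author's own statement) =====
-- stated objective: alternative
-- what changed: Replaces the frequency-dict build plus value scan with sort-then-run-scan: sort the lowercase letters and walk the sorted list counting maximal runs whose length equals the word count.
import Mathlib
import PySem

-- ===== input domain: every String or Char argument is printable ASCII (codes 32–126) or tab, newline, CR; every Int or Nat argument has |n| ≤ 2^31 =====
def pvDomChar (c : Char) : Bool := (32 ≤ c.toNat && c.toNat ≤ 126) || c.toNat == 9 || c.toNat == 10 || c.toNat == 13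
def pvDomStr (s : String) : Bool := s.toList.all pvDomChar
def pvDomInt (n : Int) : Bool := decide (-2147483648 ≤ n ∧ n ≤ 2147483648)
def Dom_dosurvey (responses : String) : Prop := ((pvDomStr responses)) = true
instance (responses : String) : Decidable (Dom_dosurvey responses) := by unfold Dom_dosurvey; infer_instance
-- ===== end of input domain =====

-- B replaces the frequency dict + value scan by sort-then-run-scan: sort the lowercase
-- letters and count maximal runs whose length equals the word count (alternative algorithm).

-- ===== PORT A =====
def dosurvey (responses : String) : Int :=
  let responsecount : Int := (PySem.Str.split₀ responses).length
  let x : PySem.Dict Char Int :=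
    responses.toList.foldl
      (fun d c => if 'a' ≤ c && c ≤ 'z' then d.modify c 0 (· + 1) else d)
      PySem.Dict.empty
  x.values.foldl (fun ret count => if count == responsecount then ret + 1 else ret) 0

-- ===== PORT B =====
-- scan(rest): the inner while loop counts the run of rest[0] (k = 1 + length of the
-- prefix of rest[1:] equal to rest[0]); rest[k:] is the remainder.
def pvScan (rc : Int) : List Char → Int
  | [] => 0
  | h :: t =>
    let run := t.takeWhile (fun c => c == h)
    (if ((1 + run.length : Int) == rc) then 1 else 0) + pvScan rc (t.drop run.length)
termination_by l => l.length
decreasing_by simp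

def dosurvey_alt (responses : String) : Int :=
  let responsecount : Int := (PySem.Str.split₀ responses).length
  let letters : List Char :=
    PySem.List.sorted (responses.toList.filter (fun c => 'a' ≤ c && c ≤ 'z')) (fun x => x) false
  pvScan responsecount letters

-- ===== PRECONDITION & SPEC =====
def Spec_dosurvey (responses : String) (out : Int) : Prop := out = dosurvey_alt responses
instance (responses : String) (out : Int) : Decidable (Spec_dosurvey responses out) := by unfold Spec_dosurvey; infer_instance

-- ===== CLAIM (what is proved, stated in full; the proofs are below) =====
def Claim_equal_dosurvey : Prop := ∀ (responses : String), Dom_dosurvey responses → Spec_dosurvey responses (dosurvey responses)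

-- ===== LEMMAS AND PROOFS =====

-- head of dropWhile fails the predicate
theorem pv_dropWhile_head_false {α : Type} (p : α → Bool) : ∀ (l : List α) (a : α) (l' : List α),
    l.dropWhile p = a :: l' → p a = false := by
  intro l
  induction l with
  | nil => intro a l' h; simp [List.dropWhile] at h
  | cons x xs ih =>
    intro a l' h
    by_cases hp : p x = true
    · rw [List.dropWhile_cons_of_pos hp] at h
      exact ih a l' h
    · rw [List.dropWhile_cons_of_neg hp] at h
      cases h
      simpa using hp

-- On an ascending list, the run scan counts the distinct elements whose multiplicity is rc.
theorem pvScan_sorted_aux (rc : Int) : ∀ (n : ℕ) (l : List Char), l.length ≤ n →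
    l.Pairwise (· ≤ ·) →
    pvScan rc l = (((PySem.Set.ofList l).countP (fun k => (l.count k : Int) == rc) : Int)) := by
  intro n
  induction n with
  | zero =>
    intro l hl _
    have : l = [] := List.eq_nil_of_length_eq_zero (Nat.le_zero.mp hl)
    subst this
    simp [pvScan, PySem.Set.ofList]
  | succ n ih =>
    intro l hl hs
    match l, hl, hs with
    | [], _, _ => simp [pvScan, PySem.Set.ofList]
    | h :: t, hl, hs =>
      obtain ⟨rest, hsplit⟩ := List.takeWhile_prefix (p := fun c => c == h) (l := t)
      set run : List Char := t.takeWhile (fun c => c == h) with hrun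
      -- the remainder after the run
      have hdrop : t.drop run.length = rest := by
        rw [← hsplit, List.drop_left]
      have hrestdw : rest = t.dropWhile (fun c => c == h) := by
        have := List.takeWhile_append_dropWhile (p := fun c => c == h) (l := t)
        have h2 : run ++ rest = run ++ t.dropWhile (fun c => c == h) := by
          rw [hsplit]; exact this.symm
        exact (List.append_cancel_left h2)
      have hrunh : ∀ x ∈ run, x = h := by
        intro x hx
        have := List.mem_takeWhile_imp hx
        simpa using this
      -- every element of rest is strictly greater than h, hence h ∉ rest
      have hnotin : h ∉ rest := by
        cases hr : rest with
        | nil => simp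
        | cons r rs =>
          have hpr : (r == h) = false := by
            apply pv_dropWhile_head_false (fun c => c == h) t r rs
            rw [← hrestdw, hr]
          have hrneh : r ≠ h := by simpa using hpr
          -- from sortedness: h ≤ r and r ≤ every element of rs
          have hmem_t : ∀ x ∈ rest, x ∈ t := by
            intro x hx; rw [← hsplit]; exact List.mem_append_right _ hx
          have hle : h ≤ r := (List.pairwise_cons.mp hs).1 r (hmem_t r (by rw [hr]; simp))
          have hlt : h < r := lt_of_le_of_ne hle (Ne.symm hrneh)
          have hpair_rest : rest.Pairwise (· ≤ ·) := by
            have ht : t.Pairwise (· ≤ ·) := (List.pairwise_cons.mp hs).2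
            have : rest.Sublist t := by
              rw [← hsplit]; exact List.sublist_append_right run rest
            exact ht.sublist this
          intro hmem
          rcases List.mem_cons.mp hmem with h1 | h2
          · exact hrneh h1.symm
          · have : r ≤ h := (List.pairwise_cons.mp (hr ▸ hpair_rest)).1 h h2
            exact absurd (lt_of_lt_of_le hlt this) (lt_irrefl h)
      have hpair_rest : rest.Pairwise (· ≤ ·) := by
        have ht : t.Pairwise (· ≤ ·) := (List.pairwise_cons.mp hs).2
        have : rest.Sublist t := by
          rw [← hsplit]; exact List.sublist_append_right run rest
        exact ht.sublist this
      -- counts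
      have hl_eq : h :: t = h :: (run ++ rest) := by rw [hsplit]
      have hcount_h : (h :: t).count h = 1 + run.length := by
        rw [hl_eq]
        have h1 : run.count h = run.length := by
          rw [List.count_eq_length]
          intro b hb
          simp [hrunh b hb]
        have h2 : rest.count h = 0 := List.count_eq_zero.mpr hnotin
        simp [List.count_append, h1, h2]
        omega
      have hcount_ne : ∀ k : Char, k ≠ h → (h :: t).count k = rest.count k := by
        intro k hk
        rw [hl_eq]
        have h1 : run.count k = 0 := by
          rw [List.count_eq_zero]
          intro hkr
          exact hk (hrunh k hkr)
        simp [List.count_append, h1, Ne.symm hk]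
      have hmem_iff : ∀ a : Char, a ∈ h :: t ↔ a = h ∨ a ∈ rest := by
        intro a
        rw [hl_eq]
        constructor
        · intro ha
          rcases List.mem_cons.mp ha with h1 | h2
          · exact Or.inl h1
          · rcases List.mem_append.mp h2 with h3 | h4
            · exact Or.inl (hrunh a h3)
            · exact Or.inr h4
        · intro ha
          rcases ha with h1 | h2
          · exact h1 ▸ List.mem_cons_self
          · exact List.mem_cons_of_mem _ (List.mem_append_right _ h2)
      -- permutation of the distinct-element lists
      have hndl : (PySem.Set.ofList (h :: t)).Nodup := PySem.Set.nodup_ofList _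
      have hndr : (h :: PySem.Set.ofList rest).Nodup := by
        refine List.nodup_cons.mpr ⟨?_, PySem.Set.nodup_ofList _⟩
        rw [PySem.Set.mem_ofList]
        exact hnotin
      have hpermS : (PySem.Set.ofList (h :: t)).Perm (h :: PySem.Set.ofList rest) := by
        rw [List.perm_ext_iff_of_nodup hndl hndr]
        intro a
        rw [PySem.Set.mem_ofList, hmem_iff a, List.mem_cons, PySem.Set.mem_ofList]
      -- induction hypothesis on rest
      have hrest_len : rest.length ≤ n := by
        have : (h :: t).length = 1 + run.length + rest.length := by
          rw [hl_eq]; simp; omega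
        omega
      have hih := ih rest hrest_len hpair_rest
      -- unfold one step of pvScan
      have hstep : pvScan rc (h :: t)
          = (if ((1 + run.length : Int) == rc) then 1 else 0) + pvScan rc rest := by
        rw [pvScan, ← hrun, hdrop]
      rw [hstep, hih, hpermS.countP_eq]
      have hcongr : (PySem.Set.ofList rest).countP (fun k => ((h :: t).count k : Int) == rc)
          = (PySem.Set.ofList rest).countP (fun k => (rest.count k : Int) == rc) := by
        apply List.countP_congr
        intro k hk
        have hk' : k ∈ rest := (PySem.Set.mem_ofList _ _).mp hk
        have hkne : k ≠ h := by
          intro he; exact hnotin (he ▸ hk')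
        rw [hcount_ne k hkne]
      rw [List.countP_cons, hcongr, hcount_h]
      push_cast
      split_ifs with hc1 hc2 hc3 <;> simp_all <;> omega

theorem pvScan_sorted (rc : Int) (l : List Char) (hs : l.Pairwise (· ≤ ·)) :
    pvScan rc l = (((PySem.Set.ofList l).countP (fun k => (l.count k : Int) == rc) : Int)) :=
  pvScan_sorted_aux rc l.length l le_rfl hs

-- ===== VERDICT (by name: the statement is the Claim_ definition above) =====
theorem dosurvey_spec : Claim_equal_dosurvey := by
  intro responses _
  unfold Spec_dosurvey dosurvey dosurvey_alt
  simp only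
  set rc : Int := ((PySem.Str.split₀ responses).length : Int) with hrc
  set fl : List Char := responses.toList.filter (fun c => 'a' ≤ c && c ≤ 'z') with hfl
  -- A side: the foldl builds Counter(fl); its values are the counts of the distinct elements
  have hA : responses.toList.foldl
      (fun d c => if 'a' ≤ c && c ≤ 'z' then d.modify c 0 (· + 1) else d)
      PySem.Dict.empty = PySem.Dict.counter fl := by
    rw [PySem.Dict.counter_eq_foldl, hfl, List.foldl_filter]
  rw [hA]
  have hvals : (PySem.Dict.counter fl).values
      = (PySem.Set.ofList fl).map (fun k => ((fl.count k : Int))) := by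
    show ((PySem.Dict.counter fl).items).map (·.2) = _
    rw [PySem.Dict.items_counter, List.map_map]
    rfl
  rw [hvals, PySem.List.foldl_beq_add_one, List.count_eq_countP, List.countP_map]
  -- B side
  set sl : List Char := PySem.List.sorted fl (fun x => x) false with hsl
  have hperm : sl.Perm fl := PySem.List.sorted_perm fl (fun x => x) false
  have hpair : sl.Pairwise (· ≤ ·) := PySem.List.sorted_pairwise fl (fun x => x)
  rw [pvScan_sorted rc sl hpair]
  -- the two countP's agree: same distinct-element sets, same counts
  have hnd1 : (PySem.Set.ofList sl).Nodup := PySem.Set.nodup_ofList sl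
  have hnd2 : (PySem.Set.ofList fl).Nodup := PySem.Set.nodup_ofList fl
  have hmem : ∀ a : Char, a ∈ PySem.Set.ofList sl ↔ a ∈ PySem.Set.ofList fl := by
    intro a
    rw [PySem.Set.mem_ofList, PySem.Set.mem_ofList, hperm.mem_iff]
  have hpermS : (PySem.Set.ofList sl).Perm (PySem.Set.ofList fl) :=
    (List.perm_ext_iff_of_nodup hnd1 hnd2).mpr hmem
  have hcnt : ∀ k : Char, sl.count k = fl.count k := fun k => hperm.count_eq k
  have : (PySem.Set.ofList sl).countP (fun k => (sl.count k : Int) == rc)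
      = (PySem.Set.ofList fl).countP (fun k => (fl.count k : Int) == rc) := by
    rw [hpermS.countP_eq]
    apply List.countP_congr
    intro k _
    simp [hcnt k]
  rw [this]
  have hcp : List.countP ((fun x => x == rc) ∘ fun k => ((fl.count k : Int))) (PySem.Set.ofList fl)
      = List.countP (fun k => ((fl.count k : Int) == rc)) (PySem.Set.ofList fl) := rfl
  rw [hcp]
  omega
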